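-- pv_equiv track=rewrite | github.com/chilcano/how-tos | src/python_challenges/02_secure_fragment_allocation.py | distribute_fragments
-- ===== SOURCE A (Python) =====
-- def distribute_fragments(datacenter_risks, total_fragments):
--     sorted_datacenter_risks = sorted(datacenter_risks.items(), key=lambda x: x[1], reverse=False)
--     fragments_distribution = {key: 0 for key in datacenter_risks.keys()}
--
--     for _ in range(total_fragments):
--         min_risk_key = sorted_datacenter_risks[0][0]
--         min_total_risk = (sorted_datacenter_risks[0][1] ** (fragments_distribution[min_risk_key] + 1))
--         for key, risk in sorted_datacenter_risks:
--             potential_risk = (risk ** (fragments_distribution[key] + 1))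
--             if potential_risk < min_total_risk:
--                 min_total_risk = potential_risk
--                 min_risk_key = key
--
--         fragments_distribution[min_risk_key] += 1
--
--     total_risk = sum(datacenter_risks[key] ** fragments_distribution[key] for key in fragments_distribution)
--
--     return fragments_distribution, total_risk
-- ===== SOURCE B (Python) =====
-- def distribute_fragments(datacenter_risks, total_fragments):
--     entries = sorted(datacenter_risks.items(), key=lambda x: x[1])
--     queue = [(risk, pos, key, risk, 1) for pos, (key, risk) in enumerate(entries)]
--     counts = {key: 0 for key in datacenter_risks}
--     for _ in range(total_fragments):
--         pot, pos, key, risk, cnt = queue.pop(0)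
--         counts[key] = cnt
--         npot = risk ** (cnt + 1)
--         i, m = 0, len(queue)
--         while i < m:
--             e = queue[i]
--             ep = e[0]
--             if ep < npot or (ep == npot and e[1] < pos):
--                 i += 1
--             else:
--                 break
--         queue.insert(i, (npot, pos, key, risk, cnt + 1))
--     total_risk = sum(risk ** counts[key] for key, risk in datacenter_risks.items())
--     return counts, total_risk
-- ===== Notes on version B (the rewrite author's own statement) =====
-- stated objective: faster
-- what changed: Instead of rescanning every datacenter and recomputing risk**(count+1) for all of them on each of the total_fragments rounds, B maintains a priority queue (sorted list) of one (potential, position) entry per datacenter, pops its head each round and re-inserts the single updated entry, computing exactly one new power per round.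
import Mathlib
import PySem

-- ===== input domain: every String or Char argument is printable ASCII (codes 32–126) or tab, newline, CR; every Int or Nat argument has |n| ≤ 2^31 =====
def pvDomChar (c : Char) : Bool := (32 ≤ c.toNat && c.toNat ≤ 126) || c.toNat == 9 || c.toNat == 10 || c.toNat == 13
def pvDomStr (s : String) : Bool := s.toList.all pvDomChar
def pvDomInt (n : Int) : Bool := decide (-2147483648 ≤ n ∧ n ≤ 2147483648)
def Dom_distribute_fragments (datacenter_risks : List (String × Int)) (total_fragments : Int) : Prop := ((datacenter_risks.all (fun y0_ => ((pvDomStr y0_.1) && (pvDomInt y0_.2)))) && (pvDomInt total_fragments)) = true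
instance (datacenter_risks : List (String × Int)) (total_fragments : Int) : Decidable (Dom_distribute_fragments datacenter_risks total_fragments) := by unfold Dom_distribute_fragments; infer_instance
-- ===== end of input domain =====

-- B replaces A's full rescan (all potentials recomputed every round) by a priority queue
-- (sorted list) popped and updated once per round: one new power per round instead of n.


-- ===== PORT A =====
-- one pass of A's outer loop: scan every datacenter, recompute its potential, keep the first minimum
def pvAStep (s : List (String × Int)) (c : PySem.Dict String Int) : PySem.Dict String Int :=
  match s with
  | [] => c  -- Python raises IndexError on sorted_datacenter_risks[0]; excluded by Pre_
  | e0 :: _ =>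
    let r := s.foldl
      (fun (acc : Int × String) e =>
        let potential := e.2 ^ ((c.getD e.1 0 + 1).toNat)
        if potential < acc.1 then (potential, e.1) else acc)
      (e0.2 ^ ((c.getD e0.1 0 + 1).toNat), e0.1)
    c.modify r.2 0 (· + 1)

def distribute_fragments (datacenter_risks : List (String × Int)) (total_fragments : Int) : (List (String × Int)) × Int :=
  let sorted_dr := PySem.List.sorted datacenter_risks (fun x => x.2) false
  let c0 := (datacenter_risks.map (fun p => p.1)).foldl (fun d k => d.insert k 0) PySem.Dict.empty
  let c := (PySem.List.pyRange 0 total_fragments 1).foldl (fun c _ => pvAStep sorted_dr c) c0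
  let total := (c.keys.map (fun k => (PySem.Dict.mk datacenter_risks).getD k 0 ^ ((c.getD k 0).toNat))).sum
  (c.items, total)

-- ===== PORT B =====
-- Source B's while-loop insertion: advance past strictly smaller (potential, position) keys, insert there
def pvInsQ (ne : Int × Int × String × Int × Int) :
    List (Int × Int × String × Int × Int) → List (Int × Int × String × Int × Int)
  | [] => [ne]
  | e :: rest =>
    if e.1 < ne.1 ∨ (e.1 = ne.1 ∧ e.2.1 < ne.2.1) then e :: pvInsQ ne rest else ne :: e :: rest

-- one pass of Source B's loop: pop the queue head, record its count, re-insert its next power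
def pvBStep (st : List (Int × Int × String × Int × Int) × PySem.Dict String Int) :
    List (Int × Int × String × Int × Int) × PySem.Dict String Int :=
  match st.1 with
  | [] => st  -- Python raises IndexError on queue.pop(0); excluded by Pre_
  | (pot, pos, key, risk, cnt) :: rest =>
    let c := st.2.insert key cnt
    let npot := risk ^ ((cnt + 1).toNat)
    (pvInsQ (npot, pos, key, risk, cnt + 1) rest, c)

def distribute_fragments_alt (datacenter_risks : List (String × Int)) (total_fragments : Int) : (List (String × Int)) × Int :=
  let entries := PySem.List.sorted datacenter_risks (fun x => x.2) false
  let q0 := (PySem.List.enumerate entries 0).map (fun pe => (pe.2.2, pe.1, pe.2.1, pe.2.2, (1 : Int)))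
  let c0 := (datacenter_risks.map (fun p => p.1)).foldl (fun d k => d.insert k 0) PySem.Dict.empty
  let st := (PySem.List.pyRange 0 total_fragments 1).foldl (fun st _ => pvBStep st) (q0, c0)
  let total := (datacenter_risks.map (fun p => p.2 ^ ((st.2.getD p.1 0).toNat))).sum
  (st.2.items, total)

-- ===== PRECONDITION & SPEC =====
-- Pre_ excludes association lists with duplicate keys (they do not arise from a Python dict
-- argument, which this parameter is) and the empty dict with total_fragments > 0 (A raises IndexError).
def Pre_distribute_fragments (datacenter_risks : List (String × Int)) (total_fragments : Int) : Prop :=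
  (datacenter_risks.map (fun p => p.1)).Nodup ∧ (datacenter_risks ≠ [] ∨ total_fragments ≤ 0)
instance (datacenter_risks : List (String × Int)) (total_fragments : Int) : Decidable (Pre_distribute_fragments datacenter_risks total_fragments) := by unfold Pre_distribute_fragments; infer_instance

def pvWitness_distribute_fragments : (List (String × Int)) × Int := ([("dc1", 2), ("dc2", 3), ("dc3", 5)], 4)

def Spec_distribute_fragments (datacenter_risks : List (String × Int)) (total_fragments : Int) (out : (List (String × Int)) × Int) : Prop := out = distribute_fragments_alt datacenter_risks total_fragments
instance (datacenter_risks : List (String × Int)) (total_fragments : Int) (out : (List (String × Int)) × Int) : Decidable (Spec_distribute_fragments datacenter_risks total_fragments out) := by unfold Spec_distribute_fragments; infer_instance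

-- ===== CLAIM (what is proved, stated in full; the proofs are below) =====
def Claim_equal_distribute_fragments : Prop := ∀ (datacenter_risks : List (String × Int)) (total_fragments : Int), Dom_distribute_fragments datacenter_risks total_fragments → Pre_distribute_fragments datacenter_risks total_fragments → Spec_distribute_fragments datacenter_risks total_fragments (distribute_fragments datacenter_risks total_fragments)

-- ===== LEMMAS AND PROOFS =====

-- the canonical queue: one entry per datacenter, in sorted-risk order, under count dict c
def pvL (entries : List (String × Int)) (c : PySem.Dict String Int) :
    List (Int × Int × String × Int × Int) :=
  (PySem.List.enumerate entries 0).map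
    (fun pe => (pe.2.2 ^ ((c.getD pe.2.1 0 + 1).toNat), pe.1, pe.2.1, pe.2.2, c.getD pe.2.1 0 + 1))

-- strict order on queue entries: lexicographic on (potential, position)
def pvLt (a b : Int × Int × String × Int × Int) : Prop :=
  a.1 < b.1 ∨ (a.1 = b.1 ∧ a.2.1 < b.2.1)

theorem pvL_length (entries : List (String × Int)) (c : PySem.Dict String Int) :
    (pvL entries c).length = entries.length := by
  simp [pvL, PySem.List.length_enumerate]

theorem pvL_getElem (entries : List (String × Int)) (c : PySem.Dict String Int)
    (j : Nat) (hj : j < entries.length) :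
    (pvL entries c)[j]'(by rw [pvL_length]; exact hj) =
      (entries[j].2 ^ ((c.getD entries[j].1 0 + 1).toNat), (j : Int), entries[j].1, entries[j].2,
        c.getD entries[j].1 0 + 1) := by
  simp [pvL, PySem.List.getElem_enumerate]

theorem pvLt_trans {a b c : Int × Int × String × Int × Int}
    (h1 : pvLt a b) (h2 : pvLt b c) : pvLt a c := by
  unfold pvLt at *; omega

theorem pvLt_flip {a b : Int × Int × String × Int × Int}
    (hne : a.2.1 ≠ b.2.1) (h : ¬ pvLt a b) : pvLt b a := by
  unfold pvLt at *; omega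

theorem mem_pvInsQ (ne x : Int × Int × String × Int × Int)
    (l : List (Int × Int × String × Int × Int)) :
    x ∈ pvInsQ ne l ↔ x = ne ∨ x ∈ l := by
  induction l with
  | nil => simp [pvInsQ]
  | cons e rest ih =>
    by_cases h : e.1 < ne.1 ∨ (e.1 = ne.1 ∧ e.2.1 < ne.2.1) <;>
      simp [pvInsQ, h, ih] <;> tauto

theorem pvInsQ_perm (ne : Int × Int × String × Int × Int)
    (l : List (Int × Int × String × Int × Int)) :
    (pvInsQ ne l).Perm (ne :: l) := by
  induction l with
  | nil => simp [pvInsQ]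
  | cons e rest ih =>
    by_cases h : e.1 < ne.1 ∨ (e.1 = ne.1 ∧ e.2.1 < ne.2.1)
    · simp only [pvInsQ, if_pos h]
      exact ((ih.cons e).trans (List.Perm.swap ne e rest)).symm.symm
    · simp [pvInsQ, if_neg h]

theorem pvInsQ_pairwise (ne : Int × Int × String × Int × Int)
    (l : List (Int × Int × String × Int × Int))
    (hs : l.Pairwise pvLt) (hd : ∀ e ∈ l, e.2.1 ≠ ne.2.1) :
    (pvInsQ ne l).Pairwise pvLt := by
  induction l with
  | nil => simp [pvInsQ]
  | cons e rest ih =>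
    rcases List.pairwise_cons.mp hs with ⟨he, hrest⟩
    by_cases h : e.1 < ne.1 ∨ (e.1 = ne.1 ∧ e.2.1 < ne.2.1)
    · simp only [pvInsQ, if_pos h]
      refine List.pairwise_cons.mpr ⟨?_, ih hrest (fun x hx => hd x (List.mem_cons_of_mem _ hx))⟩
      intro x hx
      rcases (mem_pvInsQ ne x rest).mp hx with rfl | hx
      · exact h
      · exact he x hx
    · simp only [pvInsQ, if_neg h]
      have hlt : pvLt ne e := pvLt_flip (hd e (List.mem_cons_self)) h
      refine List.pairwise_cons.mpr ⟨?_, hs⟩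
      intro x hx
      rcases List.mem_cons.mp hx with rfl | hx
      · exact hlt
      · exact pvLt_trans hlt (he x hx)

-- A's inner scan keeps its accumulator when nothing beats it
theorem pvScan_keep (L : List (Int × Int × String × Int × Int)) (acc : Int × String)
    (h : ∀ e ∈ L, ¬ e.1 < acc.1) :
    L.foldl (fun (acc : Int × String) (x : Int × Int × String × Int × Int) =>
      if x.1 < acc.1 then (x.1, x.2.2.1) else acc) acc = acc := by
  induction L with
  | nil => rfl
  | cons e rest ih =>
    simp only [List.foldl_cons, if_neg (h e (List.mem_cons_self))]
    exact ih (fun x hx => h x (List.mem_cons_of_mem _ hx))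

-- A's inner scan finds the first element achieving the minimum potential
theorem pvScan_find (L1 L2 : List (Int × Int × String × Int × Int))
    (h : Int × Int × String × Int × Int) (acc : Int × String)
    (h1 : ∀ e ∈ L1, h.1 < e.1) (hacc : h.1 < acc.1) (h2 : ∀ e ∈ L2, h.1 ≤ e.1) :
    (L1 ++ h :: L2).foldl (fun (acc : Int × String) (x : Int × Int × String × Int × Int) =>
      if x.1 < acc.1 then (x.1, x.2.2.1) else acc) acc = (h.1, h.2.2.1) := by
  induction L1 generalizing acc with
  | nil =>
    simp only [List.nil_append, List.foldl_cons, if_pos hacc]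
    exact pvScan_keep L2 (h.1, h.2.2.1) (fun e he => not_lt.mpr (h2 e he))
  | cons e L1' ih =>
    simp only [List.cons_append, List.foldl_cons]
    by_cases hlt : e.1 < acc.1
    · rw [if_pos hlt]
      exact ih _ (fun x hx => h1 x (List.mem_cons_of_mem _ hx)) (h1 e (List.mem_cons_self))
    · rw [if_neg hlt]
      exact ih _ (fun x hx => h1 x (List.mem_cons_of_mem _ hx)) hacc

-- the zero-initialised counts dict reads 0 everywhere
theorem pvC0_getD (l : List String) (d : PySem.Dict String Int)
    (h : ∀ k, d.getD k 0 = 0) (k : String) :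
    (l.foldl (fun d k => d.insert k 0) d).getD k 0 = 0 := by
  induction l generalizing d with
  | nil => exact h k
  | cons a rest ih =>
    simp only [List.foldl_cons]
    refine ih _ (fun k' => ?_)
    rw [PySem.Dict.getD_insert]
    split <;> simp [h]

-- A's scan over the datacenters is the scan over the canonical queue
theorem pvScan_eq (entries : List (String × Int)) (c : PySem.Dict String Int) (acc : Int × String) :
    entries.foldl
      (fun (acc : Int × String) e =>
        let potential := e.2 ^ ((c.getD e.1 0 + 1).toNat)
        if potential < acc.1 then (potential, e.1) else acc) acc
    = (pvL entries c).foldl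
        (fun (acc : Int × String) (x : Int × Int × String × Int × Int) =>
          if x.1 < acc.1 then (x.1, x.2.2.1) else acc) acc := by
  unfold pvL
  rw [List.foldl_map]
  conv_lhs => rw [← PySem.List.map_snd_enumerate entries 0]
  rw [List.foldl_map]

-- ONE ROUND: pvBStep matches pvAStep and preserves the queue invariant
theorem pvStep_main (entries : List (String × Int)) (c : PySem.Dict String Int)
    (q : List (Int × Int × String × Int × Int))
    (hnd : (entries.map (fun p => p.1)).Nodup)
    (hK : ∀ k ∈ entries.map (fun p => p.1), k ∈ c.keys)
    (hperm : q.Perm (pvL entries c)) (hsort : q.Pairwise pvLt) :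
    (pvBStep (q, c)).2 = pvAStep entries c ∧
    (pvBStep (q, c)).1.Perm (pvL entries (pvAStep entries c)) ∧
    (pvBStep (q, c)).1.Pairwise pvLt ∧
    (pvAStep entries c).keys = c.keys := by
  cases q with
  | nil =>
    have hL : pvL entries c = [] := hperm.symm.eq_nil
    have hent : entries = [] := by
      have := pvL_length entries c
      rw [hL] at this
      exact List.length_eq_zero_iff.mp this.symm
    subst hent
    refine ⟨rfl, ?_, by simp [pvBStep], rfl⟩
    show ([] : List (Int × Int × String × Int × Int)).Perm (pvL [] (pvAStep [] c))
    rw [show pvAStep [] c = c from rfl, hL]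
  | cons h t =>
    obtain ⟨pot, pos, key, risk, cnt⟩ := h
    have hmemL : (pot, pos, key, risk, cnt) ∈ pvL entries c :=
      hperm.subset List.mem_cons_self
    obtain ⟨j, hjL, hgj⟩ := List.mem_iff_getElem.mp hmemL
    have hj : j < entries.length := by rw [pvL_length] at hjL; exact hjL
    have hcomp := hgj
    rw [pvL_getElem entries c j hj] at hcomp
    obtain ⟨hpot, hpos, hkey, hrisk, hcnt⟩ :
        entries[j].2 ^ ((c.getD entries[j].1 0 + 1).toNat) = pot ∧ (j : Int) = pos ∧
        entries[j].1 = key ∧ entries[j].2 = risk ∧ c.getD entries[j].1 0 + 1 = cnt := by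
      simpa [Prod.ext_iff] using hcomp
    -- the popped entry is the strict lexicographic minimum of the canonical queue
    have hmin : ∀ e ∈ pvL entries c, e ≠ (pot, pos, key, risk, cnt) →
        pvLt (pot, pos, key, risk, cnt) e := by
      intro e heL hne
      rcases List.mem_cons.mp (hperm.mem_iff.mpr heL) with hcase | het
      · exact absurd hcase hne
      · exact (List.pairwise_cons.mp hsort).1 e het
    -- the same, phrased on the explicit entry at index j'
    have hidx : ∀ j' (hj' : j' < entries.length), j' ≠ j →
        pot < entries[j'].2 ^ ((c.getD entries[j'].1 0 + 1).toNat) ∨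
          (pot = entries[j'].2 ^ ((c.getD entries[j'].1 0 + 1).toNat) ∧ pos < (j' : Int)) := by
      intro j' hj' hne
      have hmem' : (entries[j'].2 ^ ((c.getD entries[j'].1 0 + 1).toNat), (j' : Int),
          entries[j'].1, entries[j'].2, c.getD entries[j'].1 0 + 1) ∈ pvL entries c := by
        rw [← pvL_getElem entries c j' hj']
        exact List.getElem_mem _
      have h := hmin _ hmem' ?_
      · rcases h with h | ⟨h1, h2⟩
        · exact Or.inl h
        · exact Or.inr ⟨h1, h2⟩
      · intro hcontr
        have : ((entries[j'].2 ^ ((c.getD entries[j'].1 0 + 1).toNat), (j' : Int),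
            entries[j'].1, entries[j'].2, c.getD entries[j'].1 0 + 1) :
            Int × Int × String × Int × Int).2.1 = pos := by rw [hcontr]
        simp only at this
        omega
    have hbefore : ∀ i' (hi' : i' < j),
        pot < (entries[i']'(by omega)).2 ^ ((c.getD (entries[i']'(by omega)).1 0 + 1).toNat) := by
      intro i' hi'
      rcases hidx i' (by omega) (by omega) with h | ⟨_, hlt⟩
      · exact h
      · omega
    have hafter : ∀ i' (hlo : j < i') (hi' : i' < entries.length),
        pot ≤ entries[i'].2 ^ ((c.getD entries[i'].1 0 + 1).toNat) := by
      intro i' hlo hi'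
      rcases hidx i' hi' (by omega) with h | ⟨h, _⟩
      · exact le_of_lt h
      · exact le_of_eq h
    have hentne : entries ≠ [] := by
      intro hc; subst hc; simp at hj
    obtain ⟨e0, es, rfl⟩ := List.exists_cons_of_ne_nil hentne
    have hlenL : (pvL (e0 :: es) c).length = (e0 :: es).length := pvL_length (e0 :: es) c
    -- generic: an element of pvL at index i' is the explicit tuple
    have hshape : ∀ i' (hi' : i' < (e0 :: es).length),
        (pvL (e0 :: es) c)[i']'(by omega) =
          ((e0 :: es)[i'].2 ^ ((c.getD (e0 :: es)[i'].1 0 + 1).toNat), (i' : Int),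
            (e0 :: es)[i'].1, (e0 :: es)[i'].2, c.getD (e0 :: es)[i'].1 0 + 1) :=
      fun i' hi' => pvL_getElem (e0 :: es) c i' hi'
    -- A's scan returns (pot, key)
    have hscan : (e0 :: es).foldl
        (fun (acc : Int × String) e =>
          let potential := e.2 ^ ((c.getD e.1 0 + 1).toNat)
          if potential < acc.1 then (potential, e.1) else acc)
        (e0.2 ^ ((c.getD e0.1 0 + 1).toNat), e0.1) = (pot, key) := by
      rw [pvScan_eq]
      by_cases hj0 : j = 0
      · subst hj0
        have hacc : (e0.2 ^ ((c.getD e0.1 0 + 1).toNat), e0.1) = (pot, key) := by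
          have h1 := congrArg (fun x => x.1) hcomp
          have h2 := congrArg (fun x => x.2.2.1) hcomp
          simp only [List.getElem_cons_zero] at h1 h2
          exact Prod.ext h1 h2
        rw [hacc]
        have h01 := List.getElem_cons_drop (as := pvL (e0 :: es) c) (i := 0) (by omega)
        rw [hgj, List.drop_zero] at h01
        rw [← h01]
        rw [List.foldl_cons]
        simp only
        rw [if_neg (lt_irrefl pot)]
        apply pvScan_keep
        intro e he
        obtain ⟨i', hi', hei⟩ := List.mem_iff_getElem.mp he
        have hi'' : 0 + 1 + i' < (e0 :: es).length := by
          rw [List.length_drop] at hi'; omega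
        rw [List.getElem_drop, hshape (0 + 1 + i') hi''] at hei
        have hle := hafter (0 + 1 + i') (by omega) hi''
        rw [← hei]
        simp only
        exact not_lt.mpr hle
      · have hj0' : 0 < j := Nat.pos_of_ne_zero hj0
        have hdecomp : pvL (e0 :: es) c =
            (pvL (e0 :: es) c).take j ++ (pot, pos, key, risk, cnt) ::
              (pvL (e0 :: es) c).drop (j + 1) := by
          conv_lhs => rw [← List.take_append_drop j (pvL (e0 :: es) c)]
          have h01 := List.getElem_cons_drop (as := pvL (e0 :: es) c) (i := j) (by omega)
          rw [hgj] at h01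
          rw [← h01]
        rw [hdecomp]
        apply pvScan_find
        · intro e he
          obtain ⟨i', hi', hei⟩ := List.mem_iff_getElem.mp he
          have hi'j : i' < j := by
            rw [List.length_take] at hi'; omega
          rw [List.getElem_take, hshape i' (by omega)] at hei
          have hlt := hbefore i' hi'j
          rw [← hei]
          simp only
          exact hlt
        · have hlt := hbefore 0 hj0'
          simpa using hlt
        · intro e he
          obtain ⟨i', hi', hei⟩ := List.mem_iff_getElem.mp he
          have hi'' : j + 1 + i' < (e0 :: es).length := by
            rw [List.length_drop] at hi'; omega
          rw [List.getElem_drop, hshape (j + 1 + i') hi''] at hei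
          have hle := hafter (j + 1 + i') (by omega) hi''
          rw [← hei]
          simp only
          exact hle
    have hA : pvAStep (e0 :: es) c = c.insert key cnt := by
      rw [show pvAStep (e0 :: es) c = c.modify ((e0 :: es).foldl
        (fun (acc : Int × String) e =>
          let potential := e.2 ^ ((c.getD e.1 0 + 1).toNat)
          if potential < acc.1 then (potential, e.1) else acc)
        (e0.2 ^ ((c.getD e0.1 0 + 1).toNat), e0.1)).2 0 (· + 1) from rfl]
      rw [hscan]
      show c.insert key (c.getD key 0 + 1) = c.insert key cnt
      rw [← hkey, hcnt]
    -- distinct keys at distinct indices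
    have hne_key : ∀ i' (hi' : i' < (e0 :: es).length), i' ≠ j → (e0 :: es)[i'].1 ≠ key := by
      intro i' hi' hne hcontr
      have h1 : ((e0 :: es).map (fun p => p.1))[i']'(by simpa using hi') =
          ((e0 :: es).map (fun p => p.1))[j]'(by simpa using hj) := by
        rw [List.getElem_map, List.getElem_map, hcontr, hkey]
      exact hne (hnd.getElem_inj_iff.mp h1)
    -- the canonical queue after the update: one entry replaced
    have hLnew : pvL (e0 :: es) (c.insert key cnt) =
        (pvL (e0 :: es) c).set j (risk ^ ((cnt + 1).toNat), pos, key, risk, cnt + 1) := by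
      apply List.ext_getElem
      · rw [pvL_length, List.length_set, pvL_length]
      · intro i h1 h2
        have hi : i < (e0 :: es).length := by rw [pvL_length] at h1; exact h1
        rw [List.getElem_set, pvL_getElem _ _ i hi]
        by_cases hij : j = i
        · subst hij
          rw [if_pos rfl]
          have hcl : (c.insert key cnt).getD (e0 :: es)[j].1 0 = cnt := by
            rw [hkey, PySem.Dict.getD_insert]
            simp
          rw [hcl, hrisk, hkey, hpos]
        · rw [if_neg hij, pvL_getElem _ _ i hi]
          have hcl : (c.insert key cnt).getD (e0 :: es)[i].1 0 = c.getD (e0 :: es)[i].1 0 := by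
            rw [PySem.Dict.getD_insert, if_neg (hne_key i hi (fun h => hij h.symm))]
          rw [hcl]
    have hdecomp : pvL (e0 :: es) c =
        (pvL (e0 :: es) c).take j ++ (pot, pos, key, risk, cnt) ::
          (pvL (e0 :: es) c).drop (j + 1) := by
      conv_lhs => rw [← List.take_append_drop j (pvL (e0 :: es) c)]
      have h01 := List.getElem_cons_drop (as := pvL (e0 :: es) c) (i := j) (by omega)
      rw [hgj] at h01
      rw [← h01]
    have ht : t.Perm ((pvL (e0 :: es) c).take j ++ (pvL (e0 :: es) c).drop (j + 1)) := by
      have h1 := (hdecomp ▸ hperm).trans List.perm_middle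
      exact h1.cons_inv
    -- membership in the remaining queue keeps positions away from pos
    have hposne : ∀ e ∈ t, e.2.1 ≠ (pos : Int) := by
      intro e he
      rcases List.mem_append.mp (ht.subset he) with hm | hm
      · obtain ⟨i', hi', hei⟩ := List.mem_iff_getElem.mp hm
        have hi'j : i' < j := by rw [List.length_take] at hi'; omega
        rw [List.getElem_take, hshape i' (by omega)] at hei
        rw [← hei]
        simp only
        intro hc
        omega
      · obtain ⟨i', hi', hei⟩ := List.mem_iff_getElem.mp hm
        have hi'' : j + 1 + i' < (e0 :: es).length := by rw [List.length_drop] at hi'; omega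
        rw [List.getElem_drop, hshape (j + 1 + i') hi''] at hei
        rw [← hei]
        simp only
        intro hc
        omega
    refine ⟨hA.symm, ?_, ?_, ?_⟩
    · show (pvInsQ (risk ^ ((cnt + 1).toNat), pos, key, risk, cnt + 1) t).Perm _
      rw [hA, hLnew, List.set_eq_take_append_cons_drop, if_pos hjL]
      exact ((pvInsQ_perm _ t).trans (ht.cons _)).trans List.perm_middle.symm
    · show (pvInsQ (risk ^ ((cnt + 1).toNat), pos, key, risk, cnt + 1) t).Pairwise pvLt
      exact pvInsQ_pairwise _ t (List.pairwise_cons.mp hsort).2 hposne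
    · rw [hA]
      apply PySem.Dict.keys_insert_of_contains
      rw [PySem.Dict.contains_iff_mem_keys]
      apply hK
      rw [← hkey]
      exact List.mem_map_of_mem (List.getElem_mem hj)

-- THE LOOP: the two folds stay in lockstep
theorem pvLoop (entries : List (String × Int))
    (hnd : (entries.map (fun p => p.1)).Nodup)
    (l : List Int) (c : PySem.Dict String Int)
    (q : List (Int × Int × String × Int × Int))
    (hK : ∀ k ∈ entries.map (fun p => p.1), k ∈ c.keys)
    (hperm : q.Perm (pvL entries c)) (hsort : q.Pairwise pvLt) :
    (l.foldl (fun st _ => pvBStep st) (q, c)).2 = l.foldl (fun c _ => pvAStep entries c) c ∧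
    (l.foldl (fun c _ => pvAStep entries c) c).keys = c.keys := by
  induction l generalizing c q with
  | nil => exact ⟨rfl, rfl⟩
  | cons x rest ih =>
    obtain ⟨h2, hperm', hsort', hkeys⟩ := pvStep_main entries c q hnd hK hperm hsort
    have hK' : ∀ k ∈ entries.map (fun p => p.1), k ∈ (pvAStep entries c).keys := by
      intro k hk; rw [hkeys]; exact hK k hk
    have := ih (pvAStep entries c) (pvBStep (q, c)).1 hK' (h2 ▸ hperm') hsort'
    simp only [List.foldl_cons]
    constructor
    · rw [← this.1]
      congr 1
      rw [← h2]
    · rw [this.2, hkeys]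

-- a pairwise relation on a list lifts to its enumeration
theorem pvEnumPairwise {R : (String × Int) → (String × Int) → Prop}
    (l : List (String × Int)) (s : Int) (h : l.Pairwise R) :
    (PySem.List.enumerate l s).Pairwise (fun p q => R p.2 q.2) := by
  induction l generalizing s with
  | nil => simp [PySem.List.enumerate]
  | cons x t ih =>
    rw [PySem.List.enumerate_cons]
    rcases List.pairwise_cons.mp h with ⟨hx, ht⟩
    refine List.pairwise_cons.mpr ⟨?_, ih (s + 1) ht⟩
    intro q hq
    obtain ⟨k, hk, rfl⟩ := (PySem.List.mem_enumerate_iff t (s + 1) q).mp hq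
    exact hx t[k] (List.getElem_mem hk)

-- ===== VERDICT (by name: the statement is the Claim_ definition above) =====
theorem distribute_fragments_spec : Claim_equal_distribute_fragments := by
  intro dr tf hdom hpre
  obtain ⟨hnd, -⟩ := hpre
  unfold Spec_distribute_fragments
  have hpermS := PySem.List.sorted_perm dr (fun x => x.2) false
  have hndE : ((PySem.List.sorted dr (fun x => x.2) false).map (fun p => p.1)).Nodup :=
    (hpermS.map (fun p => p.1)).nodup_iff.mpr hnd
  have hc0getD : ∀ k, ((dr.map (fun p => p.1)).foldl
      (fun (d : PySem.Dict String Int) k => d.insert k 0) PySem.Dict.empty).getD k 0 = 0 :=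
    fun k => pvC0_getD _ _ (fun k' => PySem.Dict.getD_empty k' 0) k
  have hc0keys : ((dr.map (fun p => p.1)).foldl
      (fun (d : PySem.Dict String Int) k => d.insert k 0) PySem.Dict.empty).keys = dr.map (fun p => p.1) := by
    have h1 := PySem.Dict.keys_foldl_insert (ν := Int) (dr.map (fun p => p.1))
      (fun _ _ => 0) PySem.Dict.empty
    rw [PySem.Dict.keys_empty, PySem.Set.update_nil_left,
      PySem.Set.ofList_eq_self_of_nodup _ hnd] at h1
    exact h1
  have hK0 : ∀ k ∈ (PySem.List.sorted dr (fun x => x.2) false).map (fun p => p.1),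
      k ∈ ((dr.map (fun p => p.1)).foldl (fun (d : PySem.Dict String Int) k => d.insert k 0) PySem.Dict.empty).keys := by
    intro k hk
    rw [hc0keys]
    exact (hpermS.map (fun p => p.1)).subset hk
  have hq0 : (PySem.List.enumerate (PySem.List.sorted dr (fun x => x.2) false) 0).map
        (fun pe => (pe.2.2, pe.1, pe.2.1, pe.2.2, (1 : Int))) =
      pvL (PySem.List.sorted dr (fun x => x.2) false)
        ((dr.map (fun p => p.1)).foldl (fun (d : PySem.Dict String Int) k => d.insert k 0) PySem.Dict.empty) := by
    unfold pvL
    apply List.map_congr_left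
    intro pe _
    rw [hc0getD pe.2.1]
    norm_num
  have hsort0 : ((PySem.List.enumerate (PySem.List.sorted dr (fun x => x.2) false) 0).map
      (fun pe => (pe.2.2, pe.1, pe.2.1, pe.2.2, (1 : Int)))).Pairwise pvLt := by
    rw [List.pairwise_map]
    have h1 := PySem.List.pairwise_lt_enumerate (PySem.List.sorted dr (fun x => x.2) false) 0
    have h2 := pvEnumPairwise (PySem.List.sorted dr (fun x => x.2) false) 0
      (PySem.List.sorted_pairwise dr (fun x => x.2))
    refine (h1.and h2).imp ?_
    rintro a b ⟨hlt, hle⟩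
    unfold pvLt
    simp only
    rcases lt_or_eq_of_le hle with h | h
    · exact Or.inl h
    · exact Or.inr ⟨h, hlt⟩
  obtain ⟨hceq, hkeys⟩ := pvLoop (PySem.List.sorted dr (fun x => x.2) false) hndE
    (PySem.List.pyRange 0 tf 1)
    ((dr.map (fun p => p.1)).foldl (fun (d : PySem.Dict String Int) k => d.insert k 0) PySem.Dict.empty)
    ((PySem.List.enumerate (PySem.List.sorted dr (fun x => x.2) false) 0).map
      (fun pe => (pe.2.2, pe.1, pe.2.1, pe.2.2, (1 : Int))))
    hK0 (hq0 ▸ List.Perm.refl _) hsort0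
  simp only [distribute_fragments, distribute_fragments_alt]
  rw [hceq]
  refine Prod.ext rfl ?_
  simp only
  rw [hkeys, hc0keys, List.map_map]
  congr 1
  apply List.map_congr_left
  intro p hp
  simp only [Function.comp]
  rw [PySem.Dict.getD_of_mem_items (d := PySem.Dict.mk dr) (k := p.1) (v := p.2)
    (by simpa using hp) hnd]
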